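-- pv_equiv track=rewrite | github.com/Lmarzi/DataDriven-Thymio-AutoParking | Controllore/implementazione_data_driven.py | tolto_zeri_iniziali
-- ===== SOURCE A (Python) =====
-- def tolto_zeri_iniziali(array_numpy):
--     conta = 0
--     for dato in array_numpy:
--         if dato[0] == 0 and dato[1] == 0:
--             conta += 1
--         else:
--             break
--     return array_numpy[conta:len(array_numpy)]
-- ===== SOURCE B (Python) =====
-- def tolto_zeri_iniziali(array_numpy):
--     if len(array_numpy) > 0 and array_numpy[0][0] == 0 and array_numpy[0][1] == 0:
--         return tolto_zeri_iniziali(array_numpy[1:])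
--     return array_numpy
-- ===== Notes on version B (the rewrite author's own statement) =====
-- stated objective: simpler
-- what changed: Replaces the counter-loop-with-break plus slice by a direct structural recursion that drops leading [0,0]-prefixed rows and returns the remaining suffix.
import Mathlib
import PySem

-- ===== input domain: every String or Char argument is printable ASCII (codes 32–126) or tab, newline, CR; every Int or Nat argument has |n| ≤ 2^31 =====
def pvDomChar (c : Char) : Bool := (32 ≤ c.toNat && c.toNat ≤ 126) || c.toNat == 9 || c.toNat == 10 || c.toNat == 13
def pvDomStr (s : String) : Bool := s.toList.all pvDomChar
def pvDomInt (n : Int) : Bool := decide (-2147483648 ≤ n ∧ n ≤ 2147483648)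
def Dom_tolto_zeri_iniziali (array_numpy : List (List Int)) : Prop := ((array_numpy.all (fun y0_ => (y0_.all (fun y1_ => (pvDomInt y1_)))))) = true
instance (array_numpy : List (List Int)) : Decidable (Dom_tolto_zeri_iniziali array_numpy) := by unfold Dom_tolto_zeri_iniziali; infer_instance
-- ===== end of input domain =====

-- B replaces A's counter-loop-with-break plus slice by a direct structural recursion
-- dropping leading [0,0]-prefixed rows (same return values; not faster, simpler).

-- ===== PORT A =====
-- the for-loop with break, accumulating `conta`; dato[0]/dato[1] are IndexErrors on
-- short rows (excluded by Pre_), here read with a non-zero default so the loop breaks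
def tzGo : List (List Int) → Int → Int
  | [], c => c
  | d :: rest, c =>
      if PySem.List.pyGetD d 0 1 = 0 ∧ PySem.List.pyGetD d 1 1 = 0 then tzGo rest (c + 1) else c

def tolto_zeri_iniziali (array_numpy : List (List Int)) : List (List Int) :=
  let conta := tzGo array_numpy 0
  PySem.List.slice array_numpy (some conta) (some (array_numpy.length : Int))

-- ===== PORT B =====
def tolto_zeri_iniziali_alt : List (List Int) → List (List Int)
  | [] => []
  | d :: rest =>
      if PySem.List.pyGetD d 0 1 = 0 ∧ PySem.List.pyGetD d 1 1 = 0 then tolto_zeri_iniziali_alt rest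
      else d :: rest

-- ===== PRECONDITION & SPEC =====
-- row that A counts as a leading zero row
def pvZeroRow (r : List Int) : Bool := decide (2 ≤ r.length) && decide (r.getD 0 1 = 0) && decide (r.getD 1 1 = 0)
-- row A can test without an IndexError (short-circuit: r[1] is only read when r[0] = 0)
def pvSafeRow (r : List Int) : Bool := !r.isEmpty && (decide (r.getD 0 0 ≠ 0) || decide (2 ≤ r.length))

-- Pre_ excludes exactly the inputs on which Python A raises IndexError: those where the
-- first row reached by the scan (all earlier rows being [0,0]-prefixed) is too short to test.
def Pre_tolto_zeri_iniziali (array_numpy : List (List Int)) : Prop :=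
  ∀ i < array_numpy.length,
    (∀ j < i, pvZeroRow (array_numpy.getD j []) = true) → pvSafeRow (array_numpy.getD i []) = true
instance (array_numpy : List (List Int)) : Decidable (Pre_tolto_zeri_iniziali array_numpy) := by
  unfold Pre_tolto_zeri_iniziali; infer_instance

def pvWitness_tolto_zeri_iniziali : List (List Int) := [[0, 0], [1, 2], [3]]

def Spec_tolto_zeri_iniziali (array_numpy : List (List Int)) (out : List (List Int)) : Prop := out = tolto_zeri_iniziali_alt array_numpy
instance (array_numpy : List (List Int)) (out : List (List Int)) : Decidable (Spec_tolto_zeri_iniziali array_numpy out) := by unfold Spec_tolto_zeri_iniziali; infer_instance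

-- ===== CLAIM (what is proved, stated in full; the proofs are below) =====
def Claim_equal_tolto_zeri_iniziali : Prop := ∀ (array_numpy : List (List Int)), Dom_tolto_zeri_iniziali array_numpy → Pre_tolto_zeri_iniziali array_numpy → Spec_tolto_zeri_iniziali array_numpy (tolto_zeri_iniziali array_numpy)

-- ===== LEMMAS AND PROOFS =====

theorem tzGo_shift (l : List (List Int)) : ∀ c : Int, tzGo l c = c + tzGo l 0 := by
  induction l with
  | nil => intro c; simp [tzGo]
  | cons d rest ih =>
    intro c
    by_cases h : PySem.List.pyGetD d 0 1 = 0 ∧ PySem.List.pyGetD d 1 1 = 0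
    · simp only [tzGo, if_pos h, zero_add, ih (c + 1), ih 1]; ring
    · simp [tzGo, if_neg h]

theorem tzGo_nonneg (l : List (List Int)) : 0 ≤ tzGo l 0 := by
  induction l with
  | nil => simp [tzGo]
  | cons d rest ih =>
    by_cases h : PySem.List.pyGetD d 0 1 = 0 ∧ PySem.List.pyGetD d 1 1 = 0
    · simp only [tzGo, if_pos h, zero_add, tzGo_shift rest 1]; omega
    · simp [tzGo, if_neg h]

theorem tzGo_le (l : List (List Int)) : tzGo l 0 ≤ (l.length : Int) := by
  induction l with
  | nil => simp [tzGo]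
  | cons d rest ih =>
    by_cases h : PySem.List.pyGetD d 0 1 = 0 ∧ PySem.List.pyGetD d 1 1 = 0
    · simp only [tzGo, if_pos h, zero_add, tzGo_shift rest 1, List.length_cons]; push_cast; omega
    · simp only [tzGo, if_neg h, List.length_cons]; positivity

theorem drop_tzGo_eq_alt (l : List (List Int)) :
    List.drop (tzGo l 0).toNat l = tolto_zeri_iniziali_alt l := by
  induction l with
  | nil => simp [tzGo, tolto_zeri_iniziali_alt]
  | cons d rest ih =>
    by_cases h : PySem.List.pyGetD d 0 1 = 0 ∧ PySem.List.pyGetD d 1 1 = 0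
    · have hn := tzGo_nonneg rest
      have : (tzGo (d :: rest) 0).toNat = (tzGo rest 0).toNat + 1 := by
        simp only [tzGo, if_pos h, zero_add, tzGo_shift rest 1]; omega
      simp only [this, tolto_zeri_iniziali_alt, if_pos h, List.drop_succ_cons, ih]
    · simp [tzGo, if_neg h, tolto_zeri_iniziali_alt]

theorem tolto_eq_alt (l : List (List Int)) : tolto_zeri_iniziali l = tolto_zeri_iniziali_alt l := by
  have h0 := tzGo_nonneg l
  have hle := tzGo_le l
  unfold tolto_zeri_iniziali
  rw [PySem.List.slice_toNat _ h0 (by positivity)]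
  have hlen : ((l.length : Int)).toNat = l.length := by omega
  rw [hlen, List.take_of_length_le]
  · exact drop_tzGo_eq_alt l
  · simp only [List.length_drop]; omega

-- ===== VERDICT (by name: the statement is the Claim_ definition above) =====
theorem tolto_zeri_iniziali_spec : Claim_equal_tolto_zeri_iniziali := by
  intro a _ _
  unfold Spec_tolto_zeri_iniziali
  exact tolto_eq_alt a
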